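-- pv_equiv track=rewrite | github.com/ronenh24/farkle_simulation | src/farkle_simulation/components/utils.py | max_scoring_combination
-- ===== SOURCE A (Python) =====
-- from collections import Counter
-- from itertools import combinations
--
-- max_score = {}
--
-- def score_combination(dice_combination: tuple) -> int:
--     """
--     Calculate score of dice combination.
--     """
--     count = Counter(dice_combination)
--     score = 0
--     dice_used = 0
--
--     for die_value, cnt in count.items():
--         while cnt >= 3:
--             if die_value == 1:  # Three 1s.
--                 score += 1000
--             else:  # Three of a kind.
--                 score += die_value * 100
--
--             count[die_value] -= 3
--             cnt -= 3
--             dice_used += 3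
--
--     score += count[1] * 100  # One 1.
--     score += count[5] * 50  # One 5.
--     dice_used += count[1]
--     dice_used += count[5]
--
--     # Three pairs.
--     if len(count) == 3 and all(v == 2 for v in count.values()):
--         score = max(score, 750)
--         if score == 750:
--             dice_used = 6
--
--     if len(count) == 6:  # One of each kind.
--         score = max(score, 1000)
--         if score == 1000:
--             dice_used = 6
--
--     if dice_used < len(dice_combination):
--         score = 0
--
--     return score
--
-- def max_scoring_combination(dice_combination: tuple) -> tuple[list[int],
--                                                               list[int]]:
--     """
--     Max scoring combinations for 1 to 6 dices.
--     """
--     n = len(dice_combination)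
--     if dice_combination in max_score:
--         return max_score[dice_combination][0].copy(), \
--             max_score[dice_combination][1].copy()
--     max_scores = []
--     remaining_dice = []
--
--     for i in range(1, n + 1):
--         max_score_for_i = 0
--         remaining_dice_for_i = 0
--         for subset in combinations(dice_combination, i):
--             score = score_combination(subset)
--             if score > max_score_for_i:
--                 max_score_for_i = score
--         if max_score_for_i > 0:
--             remaining_dice_for_i = n - i
--             if remaining_dice_for_i == 0:
--                 remaining_dice_for_i = 6
--
--         max_scores.append(max_score_for_i)
--
--         remaining_dice.append(remaining_dice_for_i)
--
--     max_score[dice_combination] = (max_scores.copy(), remaining_dice.copy())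
--
--     return max_scores, remaining_dice
-- ===== SOURCE B (Python) =====
-- from collections import Counter
--
-- max_score = {}
--
-- def score_combination(dice_combination: tuple) -> int:
--     """
--     Calculate score of dice combination.
--     """
--     count = Counter(dice_combination)
--     score = 0
--     dice_used = 0
--
--     for die_value, cnt in count.items():
--         while cnt >= 3:
--             if die_value == 1:  # Three 1s.
--                 score += 1000
--             else:  # Three of a kind.
--                 score += die_value * 100
--
--             count[die_value] -= 3
--             cnt -= 3
--             dice_used += 3
--
--     score += count[1] * 100  # One 1.
--     score += count[5] * 50  # One 5.
--     dice_used += count[1]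
--     dice_used += count[5]
--
--     # Three pairs.
--     if len(count) == 3 and all(v == 2 for v in count.values()):
--         score = max(score, 750)
--         if score == 750:
--             dice_used = 6
--
--     if len(count) == 6:  # One of each kind.
--         score = max(score, 1000)
--         if score == 1000:
--             dice_used = 6
--
--     if dice_used < len(dice_combination):
--         score = 0
--
--     return score
--
-- def max_scoring_combination(dice_combination: tuple) -> tuple[list[int],
--                                                               list[int]]:
--     """
--     Max scoring combinations for 1 to 6 dices: one include/exclude
--     depth-first walk over all subsets, keeping the best score per size.
--     """
--     n = len(dice_combination)
--     if dice_combination in max_score: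
--         return max_score[dice_combination][0].copy(), \
--             max_score[dice_combination][1].copy()
--
--     best = [0] * (n + 1)
--
--     def walk(rest, chosen):
--         if not rest:
--             if chosen:
--                 s = score_combination(chosen)
--                 if s > best[len(chosen)]:
--                     best[len(chosen)] = s
--         else:
--             walk(rest[1:], chosen + (rest[0],))
--             walk(rest[1:], chosen)
--
--     walk(tuple(dice_combination), ())
--
--     max_scores = best[1:]
--     remaining_dice = [(6 if n - i == 0 else n - i) if best[i] > 0 else 0
--                       for i in range(1, n + 1)]
--
--     max_score[dice_combination] = (max_scores.copy(), remaining_dice.copy())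
--
--     return max_scores, remaining_dice
-- ===== Notes on version B (the rewrite author's own statement) =====
-- stated objective: alternative
-- what changed: Replaces the per-size nested loops over itertools.combinations(dice, i) by a single recursive include/exclude depth-first walk over all subsets that maintains a best-score-per-size table, from which max_scores and remaining_dice are derived afterwards.
import Mathlib
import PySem

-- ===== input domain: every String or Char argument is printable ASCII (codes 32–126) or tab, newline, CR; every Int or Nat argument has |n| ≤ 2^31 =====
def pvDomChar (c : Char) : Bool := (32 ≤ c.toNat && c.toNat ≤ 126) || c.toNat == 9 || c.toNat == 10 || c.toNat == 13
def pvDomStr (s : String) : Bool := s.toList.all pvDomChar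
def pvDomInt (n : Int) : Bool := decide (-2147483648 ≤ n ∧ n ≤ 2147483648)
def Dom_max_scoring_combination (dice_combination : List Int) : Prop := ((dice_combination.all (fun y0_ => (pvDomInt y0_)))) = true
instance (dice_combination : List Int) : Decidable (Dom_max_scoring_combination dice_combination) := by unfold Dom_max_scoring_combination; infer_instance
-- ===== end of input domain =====

-- B replaces A's per-size itertools.combinations scans by one include/exclude depth-first
-- walk over all subsets keeping a best-score-per-size table (objective: alternative).
-- The module-level memo dict does not affect the (deterministic) return value and both
-- Pythons maintain it identically; the ports model the memo-free computation.

-- ===== PORT A =====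
-- shared helper (identical in both Python files, per the task hint): score_combination
-- while cnt >= 3: ported as recursion on cnt, each step mutating count/score/dice_used as the Python does
def scWhile (die_value : Int) (cnt : Int) (count : PySem.Dict Int Int)
    (score dice_used : Int) : PySem.Dict Int Int × Int × Int :=
  if h : 3 ≤ cnt then
    scWhile die_value (cnt - 3)
      (count.insert die_value (count.getD die_value 0 - 3))
      (score + (if die_value = 1 then 1000 else die_value * 100))
      (dice_used + 3)
  else (count, score, dice_used)
termination_by cnt.toNat
decreasing_by omega

def score_combination (dice_combination : List Int) : Int :=
  let count := PySem.Dict.counter dice_combination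
  -- for die_value, cnt in count.items(): only values of already-visited keys are mutated,
  -- so folding over the initial items list with the original cnt is exact
  let st := count.items.foldl
      (fun (st : PySem.Dict Int Int × Int × Int) kv =>
        scWhile kv.1 kv.2 st.1 st.2.1 st.2.2) (count, 0, 0)
  let count := st.1
  let score := st.2.1 + count.getD 1 0 * 100 + count.getD 5 0 * 50
  let dice_used := st.2.2 + count.getD 1 0 + count.getD 5 0
  let st2 :=
    if count.size = 3 ∧ count.values.all (fun v => v == 2) then
      let score := max score 750
      (score, if score = 750 then 6 else dice_used)
    else (score, dice_used)
  let st3 :=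
    if count.size = 6 then
      let score := max st2.1 1000
      (score, if score = 1000 then 6 else st2.2)
    else st2
  if st3.2 < (dice_combination.length : Int) then 0 else st3.1

-- itertools.combinations(xs, k): exact, lexicographic-by-index order
def combos : Nat → List Int → List (List Int)
  | 0, _ => [[]]
  | _ + 1, [] => []
  | k + 1, x :: xs => (combos k xs).map (fun s => x :: s) ++ combos (k + 1) xs

def max_scoring_combination (dice_combination : List Int) : List Int × List Int :=
  let n : Int := dice_combination.length
  (PySem.List.pyRange 1 (n + 1) 1).foldl
    (fun (st : List Int × List Int) i =>
      let m := (combos i.toNat dice_combination).foldl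
          (fun m sub =>
            let score := score_combination sub
            if score > m then score else m) 0
      let r : Int := if m > 0 then (if n - i = 0 then 6 else n - i) else 0
      (st.1 ++ [m], st.2 ++ [r])) ([], [])

-- ===== PORT B =====
-- depth-first include/exclude walk; best[len(chosen)] is always in range (len chosen ≤ n < |best|)
def bWalk (rest chosen best : List Int) : List Int :=
  match rest with
  | [] =>
      if chosen.isEmpty then best
      else
        let s := score_combination chosen
        if s > best.getD chosen.length 0 then best.set chosen.length s else best
  | x :: rs => bWalk rs chosen (bWalk rs (chosen ++ [x]) best)

def max_scoring_combination_alt (dice_combination : List Int) : List Int × List Int :=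
  let n : Int := dice_combination.length
  let best := bWalk dice_combination [] (List.replicate (dice_combination.length + 1) 0)
  let max_scores := best.drop 1
  let remaining_dice := (PySem.List.pyRange 1 (n + 1) 1).map
    (fun i => if best.getD i.toNat 0 > 0 then (if n - i = 0 then 6 else n - i) else 0)
  (max_scores, remaining_dice)

-- ===== PRECONDITION & SPEC =====
def Spec_max_scoring_combination (dice_combination : List Int) (out : List Int × List Int) : Prop := out = max_scoring_combination_alt dice_combination
instance (dice_combination : List Int) (out : List Int × List Int) : Decidable (Spec_max_scoring_combination dice_combination out) := by unfold Spec_max_scoring_combination; infer_instance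

-- ===== CLAIM (what is proved, stated in full; the proofs are below) =====
def Claim_equal_max_scoring_combination : Prop := ∀ (dice_combination : List Int), Dom_max_scoring_combination dice_combination → Spec_max_scoring_combination dice_combination (max_scoring_combination dice_combination)

-- ===== LEMMAS AND PROOFS =====

-- the leaf update of bWalk, as a standalone function
def upd (best s : List Int) : List Int :=
  if s.isEmpty then best
  else if score_combination s > best.getD s.length 0 then
    best.set s.length (score_combination s)
  else best

-- all subsets (as subsequences), include-first order, as B's walk visits them
def subsetsOf : List Int → List (List Int)
  | [] => [[]]
  | x :: xs => (subsetsOf xs).map (fun s => x :: s) ++ subsetsOf xs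

theorem bWalk_spec (rest : List Int) : ∀ (chosen best : List Int),
    bWalk rest chosen best = (subsetsOf rest).foldl (fun b s => upd b (chosen ++ s)) best := by
  induction rest with
  | nil => intro chosen best; simp [bWalk, subsetsOf, upd]
  | cons x rs ih =>
      intro chosen best
      simp only [bWalk, subsetsOf, List.foldl_append, List.foldl_map, ih,
        List.append_assoc, List.singleton_append]

theorem upd_length (b s : List Int) : (upd b s).length = b.length := by
  unfold upd; split_ifs <;> simp [List.length_set]

theorem foldl_upd_length (L : List (List Int)) : ∀ b : List Int,
    (L.foldl upd b).length = b.length := by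
  induction L with
  | nil => intro b; rfl
  | cons s L ih => intro b; simp [List.foldl_cons, ih, upd_length]

theorem foldl_upd_slot (L : List (List Int)) : ∀ (b : List Int) (i : Nat), i < b.length →
    (L.foldl upd b).getD i 0 =
      (L.filter (fun s => !s.isEmpty && s.length == i)).foldl
        (fun m s => if score_combination s > m then score_combination s else m) (b.getD i 0) := by
  induction L with
  | nil => intro b i _; rfl
  | cons s L ih =>
      intro b i hi
      rw [List.foldl_cons, List.filter_cons]
      by_cases hs : s.isEmpty
      · rw [show upd b s = b from by simp [upd, hs]]
        rw [if_neg (by simp [hs])]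
        exact ih b i hi
      · by_cases hlen : s.length = i
        · rw [if_pos (by simp [hs, hlen]), List.foldl_cons]
          rw [ih (upd b s) i (by rw [upd_length]; exact hi)]
          congr 1
          unfold upd
          rw [if_neg hs, hlen]
          split_ifs with h
          · rw [List.getD_eq_getElem?_getD, List.getElem?_set_self hi]
            rfl
          · rfl
        · rw [if_neg (by simp [hs, hlen])]
          rw [ih (upd b s) i (by rw [upd_length]; exact hi)]
          congr 1
          unfold upd
          rw [if_neg hs]
          split_ifs with h
          · rw [List.getD_eq_getElem?_getD, List.getD_eq_getElem?_getD,
              List.getElem?_set_ne hlen]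
          · rfl

theorem filter_subsetsOf_len (l : List Int) : ∀ k : Nat,
    (subsetsOf l).filter (fun s => s.length == k) = combos k l := by
  induction l with
  | nil =>
      intro k
      cases k with
      | zero => rfl
      | succ j => rfl
  | cons x xs ih =>
      intro k
      simp only [subsetsOf, List.filter_append, List.filter_map]
      cases k with
      | zero =>
          have : (fun s => (x :: s).length == 0) = (fun _ : List Int => false) := by
            funext s; simp
          rw [Function.comp_def]
          simp only [List.length_cons]
          have hmap : (subsetsOf xs).filter (fun s => s.length + 1 == 0) = [] := by
            apply List.filter_eq_nil_iff.mpr; intro s _; simp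
          rw [hmap, ih 0]
          simp [combos]
      | succ j =>
          rw [Function.comp_def]
          simp only [List.length_cons]
          have hmap : (subsetsOf xs).filter (fun s => s.length + 1 == j + 1) =
              (subsetsOf xs).filter (fun s => s.length == j) := by
            apply List.filter_congr; intro s _; simp
          rw [hmap, ih j, ih (j + 1)]
          simp [combos]

theorem filter_subsetsOf_pos (l : List Int) (j : Nat) :
    (subsetsOf l).filter (fun s => !s.isEmpty && s.length == (j + 1)) = combos (j + 1) l := by
  rw [← filter_subsetsOf_len l (j + 1)]
  apply List.filter_congr
  intro s _
  cases s <;> simp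

-- the best table B computes, named
def bestTable (dice : List Int) : List Int :=
  bWalk dice [] (List.replicate (dice.length + 1) 0)

theorem bestTable_length (dice : List Int) : (bestTable dice).length = dice.length + 1 := by
  unfold bestTable
  rw [bWalk_spec]
  have : (fun (b s : List Int) => upd b ([] ++ s)) = upd := by
    funext b s; simp
  rw [this, foldl_upd_length]
  simp

theorem bestTable_slot (dice : List Int) (j : Nat) (hj : j + 1 < dice.length + 1) :
    (bestTable dice).getD (j + 1) 0 =
      (combos (j + 1) dice).foldl
        (fun m s => if score_combination s > m then score_combination s else m) 0 := by
  unfold bestTable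
  rw [bWalk_spec]
  have he : (fun (b s : List Int) => upd b ([] ++ s)) = upd := by
    funext b s; simp
  rw [he, foldl_upd_slot _ _ _ (by simpa using hj), filter_subsetsOf_pos]
  simp

-- A's output as maps over the range
theorem foldl_pairs (F G : Int → Int) (L : List Int) : ∀ (as bs : List Int),
    L.foldl (fun (st : List Int × List Int) i => (st.1 ++ [F i], st.2 ++ [G i])) (as, bs)
      = (as ++ L.map F, bs ++ L.map G) := by
  induction L with
  | nil => intro as bs; simp
  | cons x L ih => intro as bs; simp [List.foldl_cons, ih]

theorem drop_one_eq_map_range (b : List Int) (n : Nat) (hb : b.length = n + 1) :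
    b.drop 1 = (PySem.List.pyRange 1 ((n : Int) + 1) 1).map (fun i => b.getD i.toNat 0) := by
  rw [PySem.List.pyRange_one]
  have hn : ((n : Int) + 1 - 1).toNat = n := by omega
  rw [hn, List.map_map]
  apply List.ext_getElem
  · simp [hb]
  · intro j h1 h2
    simp only [List.getElem_drop, List.getElem_map, List.getElem_range, Function.comp]
    have hj : j + 1 < b.length := by simp [hb] at h1 ⊢; omega
    have ht : ((1 : Int) + (j : Int)).toNat = j + 1 := by omega
    rw [ht, List.getD_eq_getElem?_getD, List.getElem?_eq_getElem hj]
    simp [Nat.add_comm]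

-- ===== VERDICT (by name: the statement is the Claim_ definition above) =====
theorem max_scoring_combination_spec : Claim_equal_max_scoring_combination := by
  intro dice _
  unfold Spec_max_scoring_combination max_scoring_combination max_scoring_combination_alt
  have hA := foldl_pairs
      (fun i => (combos i.toNat dice).foldl
        (fun m s => if score_combination s > m then score_combination s else m) 0)
      (fun i => if ((combos i.toNat dice).foldl
            (fun m s => if score_combination s > m then score_combination s else m) 0) > 0
          then (if (dice.length : Int) - i = 0 then 6 else (dice.length : Int) - i) else 0)
      (PySem.List.pyRange 1 ((dice.length : Int) + 1) 1) [] []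
  have hslot : ∀ i ∈ PySem.List.pyRange 1 ((dice.length : Int) + 1) 1,
      (bestTable dice).getD i.toNat 0 = (combos i.toNat dice).foldl
        (fun m s => if score_combination s > m then score_combination s else m) 0 := by
    intro i hi
    rw [PySem.List.mem_pyRange_one] at hi
    obtain ⟨j, hj⟩ : ∃ j : Nat, i.toNat = j + 1 := ⟨i.toNat - 1, by omega⟩
    rw [hj]
    exact bestTable_slot dice j (by omega)
  show (PySem.List.pyRange 1 ((dice.length : Int) + 1) 1).foldl
      (fun (st : List Int × List Int) i =>
        (st.1 ++ [(combos i.toNat dice).foldl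
            (fun m s => if score_combination s > m then score_combination s else m) 0],
         st.2 ++ [if ((combos i.toNat dice).foldl
              (fun m s => if score_combination s > m then score_combination s else m) 0) > 0
            then (if (dice.length : Int) - i = 0 then 6 else (dice.length : Int) - i) else 0]))
      ([], [])
    = ((bestTable dice).drop 1,
       (PySem.List.pyRange 1 ((dice.length : Int) + 1) 1).map
         (fun i => if (bestTable dice).getD i.toNat 0 > 0
            then (if (dice.length : Int) - i = 0 then 6 else (dice.length : Int) - i) else 0))
  rw [hA]
  simp only [List.nil_append]
  refine Prod.ext ?_ ?_
  · show List.map _ _ = (bestTable dice).drop 1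
    rw [drop_one_eq_map_range (bestTable dice) dice.length (bestTable_length dice)]
    exact (List.map_congr_left hslot).symm
  · show List.map _ _ = List.map _ _
    apply List.map_congr_left
    intro i hi
    rw [hslot i hi]
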